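-- pv_equiv track=rewrite | github.com/arbiter07/py-algorithm | step11-15.py | solution_12
-- ===== SOURCE A (Python) =====
-- def solution_12(s):
--   ret = []
--   for i, c in enumerate(s):
--     cnt = 0
--     for index in range(i+1,len(s)):
--       cnt += 1
--       if c > s[index]:
--         break
--     ret.append(cnt)
--   return ret
-- ===== SOURCE B (Python) =====
-- def solution_12(s):
--     # Monotonic stack over the reversed string: O(n) next-smaller-to-the-right.
--     res = []
--     stack = []  # pairs (char, position in reversed string), chars strictly increasing from top
--     for k, c in enumerate(reversed(s)):
--         while stack and stack[-1][0] >= c: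
--             stack.pop()
--         res.append(k - stack[-1][1] if stack else k)
--         stack.append((c, k))
--     return res[::-1]
-- ===== Notes on version B (the rewrite author's own statement) =====
-- stated objective: faster
-- what changed: Replaced the quadratic scan-right-for-each-position with a single right-to-left pass over the reversed string maintaining a monotonic stack of suffix minima (classic next-smaller-element).
import Mathlib
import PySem

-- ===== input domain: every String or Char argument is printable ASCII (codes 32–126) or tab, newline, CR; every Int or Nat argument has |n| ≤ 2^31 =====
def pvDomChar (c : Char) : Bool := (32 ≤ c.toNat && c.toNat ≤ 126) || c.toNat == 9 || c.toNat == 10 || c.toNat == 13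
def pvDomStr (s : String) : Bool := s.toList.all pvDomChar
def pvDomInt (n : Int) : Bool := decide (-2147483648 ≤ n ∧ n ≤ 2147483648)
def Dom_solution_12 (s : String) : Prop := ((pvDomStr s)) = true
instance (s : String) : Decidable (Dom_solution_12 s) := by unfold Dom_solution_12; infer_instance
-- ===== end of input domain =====

-- B replaces A's per-position rightward scan (O(n^2)) by one right-to-left monotonic-stack pass (O(n)); same return value.

-- ===== PORT A =====
-- inner loop: 'for index in range(i+1, len(s)): cnt += 1; if c > s[index]: break'
-- (s[index] ported as pyGetD with an arbitrary default; every generated index is in range)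
def pvInnerA (cs : List Char) (c : Char) : List Int → Int → Int
  | [], cnt => cnt
  | idx :: rest, cnt =>
      if c > PySem.List.pyGetD cs idx c then cnt + 1
      else pvInnerA cs c rest (cnt + 1)

def solution_12 (s : String) : List Int :=
  let cs := s.toList
  (PySem.List.enumerate cs 0).foldl
    (fun ret ic => ret ++ [pvInnerA cs ic.2 (PySem.List.pyRange (ic.1 + 1) (cs.length : Int) 1) 0]) []

-- ===== PORT B =====
-- one step of Source B's loop body; the stack is kept top-first (append = cons, pop = tail, stack[-1] = head)
def pvStepB (acc : List Int × List (Char × Int)) (kc : Int × Char) : List Int × List (Char × Int) :=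
  let stack := acc.2.dropWhile (fun q => decide (q.1 ≥ kc.2))
  match stack with
  | q :: _ => (acc.1 ++ [kc.1 - q.2], (kc.2, kc.1) :: stack)
  | [] => (acc.1 ++ [kc.1], (kc.2, kc.1) :: stack)

def solution_12_alt (s : String) : List Int :=
  let cs := s.toList
  (((PySem.List.enumerate cs.reverse 0).foldl pvStepB ([], [])).1).reverse  -- res[::-1]

-- ===== PRECONDITION & SPEC =====
def Spec_solution_12 (s : String) (out : List Int) : Prop := out = solution_12_alt s
instance (s : String) (out : List Int) : Decidable (Spec_solution_12 s out) := by unfold Spec_solution_12; infer_instance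

-- ===== CLAIM (what is proved, stated in full; the proofs are below) =====
def Claim_equal_solution_12 : Prop := ∀ (s : String), Dom_solution_12 s → Spec_solution_12 s (solution_12 s)

-- ===== LEMMAS AND PROOFS =====

-- A's inner count over the suffix after a position, structurally
def pvScan (c : Char) : List Char → Int
  | [] => 0
  | d :: l => if d < c then 1 else 1 + pvScan c l

-- the whole answer list, structurally
def pvSpecAll : List Char → List Int
  | [] => []
  | c :: l => pvScan c l :: pvSpecAll l

-- ---- A side ----
lemma pvInnerA_eq (cs : List Char) (c : Char) :
    ∀ (k : Nat) (cnt : Int),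
      pvInnerA cs c (PySem.List.pyRange (k : Int) (cs.length : Int) 1) cnt
        = cnt + pvScan c (cs.drop k) := by
  intro k cnt
  induction h : cs.length - k generalizing k cnt with
  | zero =>
    rw [PySem.List.pyRange_one_eq_nil (by exact_mod_cast Nat.le_of_sub_eq_zero h)]
    rw [List.drop_eq_nil_of_le (by omega)]
    simp [pvInnerA, pvScan]
  | succ n ih =>
    have hk : k < cs.length := by omega
    rw [PySem.List.pyRange_one_cons (by exact_mod_cast hk)]
    rw [List.drop_eq_getElem_cons hk]
    simp only [pvInnerA, pvScan]
    have hget : PySem.List.pyGetD cs (k : Int) c = cs[k] := by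
      simp [List.getD_eq_getElem?_getD, hk]
    rw [hget]
    by_cases hc : cs[k] < c
    · simp [hc, gt_iff_lt]
    · simp only [gt_iff_lt, hc, if_false]
      have hcast : ((k : Int) + 1) = (((k + 1 : Nat)) : Int) := by push_cast; ring
      rw [hcast, ih (k + 1) (cnt + 1) (by omega)]
      ring

lemma pvA_fold (cs : List Char) :
    ∀ (k : Nat) (acc : List Int),
      (PySem.List.enumerate (cs.drop k) (k : Int)).foldl
        (fun ret ic => ret ++ [pvInnerA cs ic.2 (PySem.List.pyRange (ic.1 + 1) (cs.length : Int) 1) 0]) acc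
      = acc ++ pvSpecAll (cs.drop k) := by
  intro k
  induction h : cs.length - k generalizing k with
  | zero =>
    intro acc
    rw [List.drop_eq_nil_of_le (by omega)]
    simp [PySem.List.enumerate_nil, pvSpecAll]
  | succ n ih =>
    intro acc
    have hk : k < cs.length := by omega
    rw [List.drop_eq_getElem_cons hk]
    rw [PySem.List.enumerate_cons]
    simp only [List.foldl_cons, pvSpecAll]
    have hcast : ((k : Int) + 1) = (((k + 1 : Nat)) : Int) := by push_cast; ring
    rw [hcast]
    have hin := pvInnerA_eq cs cs[k] (k + 1) 0
    rw [show (0 : Int) + pvScan cs[k] (cs.drop (k + 1)) = pvScan cs[k] (cs.drop (k + 1)) by ring] at hin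
    rw [hin]
    rw [ih (k + 1) (by omega)]
    simp

-- ---- B side ----
-- invariant of the stack after Source B has processed the (reversed-order) prefix p
def pvInv (p : List Char) (stack : List (Char × Int)) : Prop :=
  stack.Pairwise (fun a b => b.2 < a.2) ∧
  (∀ q ∈ stack, ∃ m : Nat, q.2 = (m : Int) ∧ m < p.length ∧ q.1 = p.getD m 'a') ∧
  (∀ m : Nat, m < p.length →
    (∃ q ∈ stack, q.2 = (m : Int)) ∨ ∃ q ∈ stack, (m : Int) < q.2 ∧ q.1 ≤ p.getD m 'a')

lemma pvScan_none (c : Char) (p : List Char)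
    (h : ∀ m, m < p.length → ¬ p.getD m 'a' < c) :
    pvScan c p.reverse = (p.length : Int) := by
  induction p using List.reverseRecOn with
  | nil => simp [pvScan]
  | append_singleton p d ih =>
    have hd : ¬ d < c := by
      have := h p.length (by simp)
      rwa [List.getD_append_right _ _ _ _ (le_refl _), Nat.sub_self] at this
    rw [List.reverse_append]
    simp only [List.reverse_singleton, List.singleton_append]
    simp only [pvScan, hd, if_false]
    rw [ih (fun m hm => by
      have := h m (by simp; omega)
      rwa [List.getD_append _ _ _ _ hm] at this)]
    simp only [List.length_append, List.length_singleton]; push_cast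
    ring

lemma pvScan_found (c : Char) : ∀ (p : List Char) (m : Nat), m < p.length →
    p.getD m 'a' < c →
    (∀ t, m < t → t < p.length → ¬ p.getD t 'a' < c) →
    pvScan c p.reverse = (p.length : Int) - (m : Int) := by
  intro p
  induction p using List.reverseRecOn with
  | nil => intro m hm; exact absurd hm (by simp)
  | append_singleton p d ih =>
    intro m hm h1 h2
    rw [List.reverse_append]
    simp only [List.reverse_singleton, List.singleton_append]
    by_cases hmp : m = p.length
    · have hd : d < c := by
        rw [hmp, List.getD_append_right _ _ _ _ (le_refl _), Nat.sub_self] at h1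
        simpa using h1
      simp only [pvScan, hd, if_true]
      rw [hmp]
      simp only [List.length_append, List.length_singleton]; push_cast
      ring
    · have hm' : m < p.length := by simp at hm; omega
      have hd : ¬ d < c := by
        have := h2 p.length (by omega) (by simp)
        rwa [List.getD_append_right _ _ _ _ (le_refl _), Nat.sub_self] at this
      simp only [pvScan, hd, if_false]
      rw [ih m hm' (by rwa [List.getD_append _ _ _ _ hm'] at h1)
        (fun t ht htl => by
          have := h2 t ht (by simp; omega)
          rwa [List.getD_append _ _ _ _ htl] at this)]
      simp only [List.length_append, List.length_singleton]; push_cast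
      ring

lemma pvDropWhile_middle {A : Type} (pred : A → Bool) :
    ∀ (u : List A) (e : A) (v : List A), (∀ x ∈ u, pred x = true) → pred e = false →
      (u ++ e :: v).dropWhile pred = e :: v := by
  intro u
  induction u with
  | nil => intro e v _ he; simp [he]
  | cons a u ih =>
    intro e v hu he
    simp only [List.cons_append, List.dropWhile_cons, hu a (by simp), if_true]
    exact ih e v (fun x hx => hu x (by simp [hx])) he

lemma pvDropped {A : Type} (pred : A → Bool) (l : List A) (q : A)
    (hq : q ∈ l) (hnot : q ∉ l.dropWhile pred) : pred q = true := by
  have h := List.takeWhile_append_dropWhile (p := pred) (l := l)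
  rw [← h] at hq
  rcases List.mem_append.1 hq with h1 | h1
  · exact List.mem_takeWhile_imp h1
  · exact absurd h1 hnot

lemma pvLK (p : List Char) (stack : List (Char × Int)) (c : Char) (h : pvInv p stack) :
    (match stack.dropWhile (fun q => decide (q.1 ≥ c)) with
     | q :: _ => ((p.length : Int)) - q.2
     | [] => ((p.length : Int))) = pvScan c p.reverse := by
  obtain ⟨hpw, hmem, hcomp⟩ := h
  by_cases hex : ∃ m : Nat, m < p.length ∧ p.getD m 'a' < c
  · obtain ⟨m0, hm0l, hm0⟩ := hex
    set M := Nat.findGreatest (fun m => m < p.length ∧ p.getD m 'a' < c) p.length with hMdef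
    have hMP : M < p.length ∧ p.getD M 'a' < c :=
      Nat.findGreatest_spec (P := fun m => m < p.length ∧ p.getD m 'a' < c) (le_of_lt hm0l) ⟨hm0l, hm0⟩
    have hMmax : ∀ t, M < t → t < p.length → ¬ p.getD t 'a' < c := by
      intro t ht htl hlt
      exact Nat.findGreatest_is_greatest (P := fun m => m < p.length ∧ p.getD m 'a' < c) ht (le_of_lt htl) ⟨htl, hlt⟩
    have hMstack : ∃ q ∈ stack, q.2 = (M : Int) := by
      rcases hcomp M hMP.1 with h1 | ⟨q, hq, hlt, hle⟩
      · exact h1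
      · obtain ⟨mq, hq2, hql, hq1⟩ := hmem q hq
        exfalso
        have hMlt : M < mq := by rw [hq2] at hlt; exact_mod_cast hlt
        rw [hq1] at hle
        exact hMmax mq hMlt hql (lt_of_le_of_lt hle hMP.2)
    obtain ⟨q, hqmem, hq2⟩ := hMstack
    obtain ⟨u, v, huv⟩ := List.append_of_mem hqmem
    subst huv
    have hures : ∀ x ∈ u, (decide (x.1 ≥ c)) = true := by
      intro x hx
      obtain ⟨mx, hx2, hxl, hx1⟩ := hmem x (by simp [hx])
      have hRx : q.2 < x.2 := (List.pairwise_append.1 hpw).2.2 x hx q (by simp)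
      have hMx : M < mx := by rw [hq2, hx2] at hRx; exact_mod_cast hRx
      rw [decide_eq_true_iff, hx1]
      exact not_lt.1 (hMmax mx hMx hxl)
    have hqfalse : (decide (q.1 ≥ c)) = false := by
      obtain ⟨mq, hq2', hql, hq1⟩ := hmem q (by simp)
      have hmqM : mq = M := by rw [hq2'] at hq2; exact_mod_cast hq2
      rw [decide_eq_false_iff_not, hq1, hmqM]
      exact not_le.2 hMP.2
    rw [pvDropWhile_middle _ u q v hures hqfalse]
    show (p.length : Int) - q.2 = _
    rw [hq2]
    exact (pvScan_found c p M hMP.1 hMP.2 hMmax).symm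
  · push Not at hex
    have hnil : stack.dropWhile (fun q => decide (q.1 ≥ c)) = [] := by
      rw [List.dropWhile_eq_nil_iff]
      intro x hx
      obtain ⟨mx, hx2, hxl, hx1⟩ := hmem x hx
      rw [decide_eq_true_iff, hx1]
      exact hex mx hxl
    rw [hnil]
    exact (pvScan_none c p (fun m hm => not_lt.2 (hex m hm))).symm

lemma pvInv_step (p : List Char) (stack : List (Char × Int)) (c : Char) (h : pvInv p stack) :
    pvInv (p ++ [c]) ((c, (p.length : Int)) :: stack.dropWhile (fun q => decide (q.1 ≥ c))) := by
  obtain ⟨hpw, hmem, hcomp⟩ := h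
  have hsub : ∀ x ∈ stack.dropWhile (fun q => decide (q.1 ≥ c)), x ∈ stack :=
    fun x hx => (List.dropWhile_sublist _).subset hx
  refine ⟨?_, ?_, ?_⟩
  · refine List.Pairwise.cons ?_ (hpw.sublist (List.dropWhile_sublist _))
    intro x hx
    obtain ⟨mx, hx2, hxl, hx1⟩ := hmem x (hsub x hx)
    show x.2 < (p.length : Int)
    rw [hx2]
    exact_mod_cast hxl
  · intro q hq
    rcases List.mem_cons.1 hq with rfl | hq'
    · refine ⟨p.length, rfl, by simp, ?_⟩
      rw [List.getD_append_right _ _ _ _ (le_refl _), Nat.sub_self]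
      rfl
    · obtain ⟨m, h2, hl, h1⟩ := hmem q (hsub q hq')
      exact ⟨m, h2, by simp; omega, by rw [List.getD_append _ _ _ _ hl]; exact h1⟩
  · intro m hm
    by_cases hmp : m = p.length
    · left
      exact ⟨(c, (p.length : Int)), by simp, by rw [hmp]⟩
    · have hm' : m < p.length := by simp at hm; omega
      have hgd : (p ++ [c]).getD m 'a' = p.getD m 'a' := List.getD_append _ _ _ _ hm'
      rcases hcomp m hm' with ⟨q, hq, hq2⟩ | ⟨q, hq, hlt, hle⟩
      · by_cases hqs : q ∈ stack.dropWhile (fun q => decide (q.1 ≥ c))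
        · left
          exact ⟨q, List.mem_cons_of_mem _ hqs, hq2⟩
        · right
          have hpred : c ≤ q.1 := of_decide_eq_true (pvDropped _ stack q hq hqs)
          obtain ⟨mq, hmq2, hmql, hmq1⟩ := hmem q hq
          have hmqm : mq = m := by rw [hmq2] at hq2; exact_mod_cast hq2
          refine ⟨(c, (p.length : Int)), by simp, by show (m : Int) < ((p.length : Nat) : Int); exact_mod_cast hm', ?_⟩
          rw [hgd]
          rw [hmq1, hmqm] at hpred
          exact hpred
      · by_cases hqs : q ∈ stack.dropWhile (fun q => decide (q.1 ≥ c))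
        · right
          exact ⟨q, List.mem_cons_of_mem _ hqs, hlt, by rw [hgd]; exact hle⟩
        · right
          have hpred : c ≤ q.1 := of_decide_eq_true (pvDropped _ stack q hq hqs)
          exact ⟨(c, (p.length : Int)), by simp, by show (m : Int) < ((p.length : Nat) : Int); exact_mod_cast hm', by rw [hgd]; exact le_trans hpred hle⟩

def pvAnsFrom (p : List Char) : List Char → List Int
  | [] => []
  | c :: r => pvScan c p.reverse :: pvAnsFrom (p ++ [c]) r

lemma pvStepB_eq (res : List Int) (stack : List (Char × Int)) (k : Int) (c : Char) :
    pvStepB (res, stack) (k, c)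
      = (res ++ [match stack.dropWhile (fun q => decide (q.1 ≥ c)) with
                 | q :: _ => k - q.2
                 | [] => k],
         (c, k) :: stack.dropWhile (fun q => decide (q.1 ≥ c))) := by
  unfold pvStepB
  cases stack.dropWhile (fun q => decide (q.1 ≥ c)) <;> rfl

lemma pvB_fold : ∀ (r p : List Char) (res : List Int) (stack : List (Char × Int)),
    pvInv p stack →
    ((PySem.List.enumerate r (p.length : Int)).foldl pvStepB (res, stack)).1
      = res ++ pvAnsFrom p r := by
  intro r
  induction r with
  | nil =>
    intro p res stack _
    simp [PySem.List.enumerate_nil, pvAnsFrom]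
  | cons c r ih =>
    intro p res stack h
    rw [PySem.List.enumerate_cons, List.foldl_cons, pvStepB_eq]
    rw [pvLK p stack c h]
    have hcast : ((p.length : Int) + 1) = (((p ++ [c]).length : Nat) : Int) := by
      simp only [List.length_append, List.length_singleton]; push_cast; ring
    rw [hcast]
    rw [ih (p ++ [c]) _ _ (pvInv_step p stack c h)]
    simp [pvAnsFrom]

lemma pvAnsFrom_eq : ∀ (r p : List Char),
    (pvAnsFrom p r).reverse ++ pvSpecAll p.reverse = pvSpecAll (r.reverse ++ p.reverse) := by
  intro r
  induction r with
  | nil => intro p; simp [pvAnsFrom]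
  | cons c r ih =>
    intro p
    simp only [pvAnsFrom, List.reverse_cons]
    rw [List.append_assoc]
    have hs : [pvScan c p.reverse] ++ pvSpecAll p.reverse = pvSpecAll ((p ++ [c]).reverse) := by
      rw [List.reverse_append]
      simp [pvSpecAll]
    rw [hs, ih (p ++ [c])]
    rw [List.reverse_append]
    simp [List.append_assoc]

lemma pvA_eq (s : String) : solution_12 s = pvSpecAll s.toList := by
  have h := pvA_fold s.toList 0 []
  simpa [solution_12] using h

lemma pvB_eq (s : String) : solution_12_alt s = pvSpecAll s.toList := by
  have h := pvB_fold s.toList.reverse [] [] []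
    (by refine ⟨List.Pairwise.nil, ?_, ?_⟩ <;> simp)
  have h2 := pvAnsFrom_eq s.toList.reverse []
  simp [pvSpecAll] at h2
  simp [solution_12_alt]
  rw [show ((0 : Int)) = ((List.length ([] : List Char) : Nat) : Int) by simp] at *
  rw [h, List.nil_append, h2]

-- ===== VERDICT (by name: the statement is the Claim_ definition above) =====
theorem solution_12_spec : Claim_equal_solution_12 := by
  intro s _
  unfold Spec_solution_12
  rw [pvA_eq, pvB_eq]
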